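-- pv_equiv track=rewrite | github.com/XdiWang/LLM_Parser | app.py | get_available_parsers
-- ===== SOURCE A (Python) =====
-- PARSER_INFO = {
--     "Docling": "Supports PDF, DOCX, PPTX, XLSX, HTML, images, and more. Ideal as a unified entry point.",
--     "Unstructured": "Multi-format parser suitable for unified extraction from unstructured documents.",
--     "PyPDFLoader": "LangChain's basic PDF parser, suitable for general text extraction.",
--     "PyMuPDF": "Fast and metadata-rich, suitable for standard PDFs.",
--     "PyMuPDF4LLM": "Converts PDFs into Markdown output better suited for LLMs.",
--     "PDFPlumber": "Usually more friendly for multi-column layouts and complex formatting.",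
--     "PyPDFium2": "Built on PDFium with strong parsing performance.",
--     "PDFMiner": "Pure Python implementation with a focus on layout analysis.",
--     "OpenDataLoader": "Parses PDFs into Markdown and supports content safety filtering.",
--     "PyPDFDirectory": "Batch directory loader that can parse multiple PDFs from one directory.",
--     "CSVLoader": "Used for parsing CSV files, suitable for structured tabular data.",
--     "JSONLoader": "Used for parsing JSON files and can extract content with a jq schema.",
--     "BSHTMLLoader": "Used for parsing HTML files and extracting text via BeautifulSoup.",
-- }
--
-- PARSER_SUPPORT = {
--     "Docling": {"pdf", "docx", "pptx", "xlsx", "html", "htm", "md", "txt", "png", "jpg", "jpeg", "tiff", "bmp"},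
--     "Unstructured": {"pdf", "docx", "pptx", "xlsx", "html", "htm", "md", "txt", "csv", "json"},
--     "PyPDFLoader": {"pdf"},
--     "PyMuPDF": {"pdf"},
--     "PyMuPDF4LLM": {"pdf"},
--     "PDFPlumber": {"pdf"},
--     "PyPDFium2": {"pdf"},
--     "PDFMiner": {"pdf"},
--     "OpenDataLoader": {"pdf"},
--     "PyPDFDirectory": {"pdf"},
--     "CSVLoader": {"csv"},
--     "JSONLoader": {"json"},
--     "BSHTMLLoader": {"html", "htm"},
-- }
--
-- PREFERRED_ORDER = [
--     "Docling",
--     "Unstructured",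
--     "PyPDFLoader",
--     "PyMuPDF",
--     "PyMuPDF4LLM",
--     "CSVLoader",
--     "JSONLoader",
--     "BSHTMLLoader",
--     "PDFPlumber",
--     "PyPDFium2",
--     "PDFMiner",
--     "OpenDataLoader",
--     "PyPDFDirectory",
-- ]
--
-- def get_available_parsers(file_extension: str) -> list[str]:
--     if not file_extension:
--         return list(PARSER_INFO.keys())
--     return [
--         parser_name
--         for parser_name in PREFERRED_ORDER
--         if file_extension in PARSER_SUPPORT.get(parser_name, set())
--     ]
-- ===== SOURCE B (Python) =====
-- # B: replaces the per-call scan over PREFERRED_ORDER with a flat, hard-coded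
-- # inverted lookup table (extension -> parser names in preferred order).
--
-- PARSER_NAMES = [
--     "Docling", "Unstructured", "PyPDFLoader", "PyMuPDF", "PyMuPDF4LLM",
--     "PDFPlumber", "PyPDFium2", "PDFMiner", "OpenDataLoader", "PyPDFDirectory",
--     "CSVLoader", "JSONLoader", "BSHTMLLoader",
-- ]
--
-- PDF_PARSERS = ["Docling", "Unstructured", "PyPDFLoader", "PyMuPDF", "PyMuPDF4LLM",
--                "PDFPlumber", "PyPDFium2", "PDFMiner", "OpenDataLoader", "PyPDFDirectory"]
--
-- EXT_TO_PARSERS = {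
--     "pdf": PDF_PARSERS,
--     "docx": ["Docling", "Unstructured"],
--     "pptx": ["Docling", "Unstructured"],
--     "xlsx": ["Docling", "Unstructured"],
--     "html": ["Docling", "Unstructured", "BSHTMLLoader"],
--     "htm": ["Docling", "Unstructured", "BSHTMLLoader"],
--     "md": ["Docling", "Unstructured"],
--     "txt": ["Docling", "Unstructured"],
--     "png": ["Docling"],
--     "jpg": ["Docling"],
--     "jpeg": ["Docling"],
--     "tiff": ["Docling"],
--     "bmp": ["Docling"],
--     "csv": ["Unstructured", "CSVLoader"],
--     "json": ["Unstructured", "JSONLoader"],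
-- }
--
--
-- def get_available_parsers(file_extension: str) -> list[str]:
--     if not file_extension:
--         return list(PARSER_NAMES)
--     return list(EXT_TO_PARSERS.get(file_extension, []))
-- ===== Notes on version B (the rewrite author's own statement) =====
-- stated objective: alternative
-- what changed: Replaces the per-call filter of PREFERRED_ORDER with set-membership tests against PARSER_SUPPORT by a flat hard-coded inverted lookup table mapping each extension directly to its parser list (preferred order baked in), so a call is a single dict lookup plus the empty-extension guard.
import Mathlib
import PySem

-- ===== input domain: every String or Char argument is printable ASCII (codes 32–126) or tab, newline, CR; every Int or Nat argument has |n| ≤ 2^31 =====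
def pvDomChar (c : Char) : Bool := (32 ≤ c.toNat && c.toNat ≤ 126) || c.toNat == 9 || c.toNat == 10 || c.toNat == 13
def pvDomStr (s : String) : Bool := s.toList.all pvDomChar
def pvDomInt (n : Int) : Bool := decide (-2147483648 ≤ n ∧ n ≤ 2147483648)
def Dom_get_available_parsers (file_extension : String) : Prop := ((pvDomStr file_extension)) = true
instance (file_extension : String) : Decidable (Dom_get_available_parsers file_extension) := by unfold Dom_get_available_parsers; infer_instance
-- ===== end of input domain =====

-- B replaces A's per-call scan (filter of PREFERRED_ORDER with set-membership tests) by a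
-- flat hard-coded inverted lookup table extension -> parser list (objective: alternative).

-- ===== PORT A =====
def pvPARSER_INFO : PySem.Dict String String := PySem.Dict.ofList [
  ("Docling", "Supports PDF, DOCX, PPTX, XLSX, HTML, images, and more. Ideal as a unified entry point."),
  ("Unstructured", "Multi-format parser suitable for unified extraction from unstructured documents."),
  ("PyPDFLoader", "LangChain's basic PDF parser, suitable for general text extraction."),
  ("PyMuPDF", "Fast and metadata-rich, suitable for standard PDFs."),
  ("PyMuPDF4LLM", "Converts PDFs into Markdown output better suited for LLMs."),
  ("PDFPlumber", "Usually more friendly for multi-column layouts and complex formatting."),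
  ("PyPDFium2", "Built on PDFium with strong parsing performance."),
  ("PDFMiner", "Pure Python implementation with a focus on layout analysis."),
  ("OpenDataLoader", "Parses PDFs into Markdown and supports content safety filtering."),
  ("PyPDFDirectory", "Batch directory loader that can parse multiple PDFs from one directory."),
  ("CSVLoader", "Used for parsing CSV files, suitable for structured tabular data."),
  ("JSONLoader", "Used for parsing JSON files and can extract content with a jq schema."),
  ("BSHTMLLoader", "Used for parsing HTML files and extracting text via BeautifulSoup.")]

def pvPARSER_SUPPORT : PySem.Dict String (PySem.Set String) := PySem.Dict.ofList [
  ("Docling", PySem.Set.ofList ["pdf", "docx", "pptx", "xlsx", "html", "htm", "md", "txt", "png", "jpg", "jpeg", "tiff", "bmp"]),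
  ("Unstructured", PySem.Set.ofList ["pdf", "docx", "pptx", "xlsx", "html", "htm", "md", "txt", "csv", "json"]),
  ("PyPDFLoader", PySem.Set.ofList ["pdf"]),
  ("PyMuPDF", PySem.Set.ofList ["pdf"]),
  ("PyMuPDF4LLM", PySem.Set.ofList ["pdf"]),
  ("PDFPlumber", PySem.Set.ofList ["pdf"]),
  ("PyPDFium2", PySem.Set.ofList ["pdf"]),
  ("PDFMiner", PySem.Set.ofList ["pdf"]),
  ("OpenDataLoader", PySem.Set.ofList ["pdf"]),
  ("PyPDFDirectory", PySem.Set.ofList ["pdf"]),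
  ("CSVLoader", PySem.Set.ofList ["csv"]),
  ("JSONLoader", PySem.Set.ofList ["json"]),
  ("BSHTMLLoader", PySem.Set.ofList ["html", "htm"])]

def pvPREFERRED_ORDER : List String := [
  "Docling", "Unstructured", "PyPDFLoader", "PyMuPDF", "PyMuPDF4LLM",
  "CSVLoader", "JSONLoader", "BSHTMLLoader", "PDFPlumber", "PyPDFium2",
  "PDFMiner", "OpenDataLoader", "PyPDFDirectory"]

def get_available_parsers (file_extension : String) : List String :=
  if file_extension = "" then pvPARSER_INFO.keys
  else pvPREFERRED_ORDER.filter
    (fun parser_name => PySem.Set.contains (pvPARSER_SUPPORT.getD parser_name PySem.Set.empty) file_extension)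

-- ===== PORT B =====
-- B's own module-level constants: the parser names (PARSER_INFO key order) and the
-- hard-coded inverted index extension -> supporting parsers in preferred order.
def pvB_PARSER_NAMES : List String := [
  "Docling", "Unstructured", "PyPDFLoader", "PyMuPDF", "PyMuPDF4LLM",
  "PDFPlumber", "PyPDFium2", "PDFMiner", "OpenDataLoader", "PyPDFDirectory",
  "CSVLoader", "JSONLoader", "BSHTMLLoader"]

def pvB_PDF_PARSERS : List String := [
  "Docling", "Unstructured", "PyPDFLoader", "PyMuPDF", "PyMuPDF4LLM",
  "PDFPlumber", "PyPDFium2", "PDFMiner", "OpenDataLoader", "PyPDFDirectory"]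

def pvB_EXT_TO_PARSERS : PySem.Dict String (List String) := PySem.Dict.ofList [
  ("pdf", pvB_PDF_PARSERS),
  ("docx", ["Docling", "Unstructured"]),
  ("pptx", ["Docling", "Unstructured"]),
  ("xlsx", ["Docling", "Unstructured"]),
  ("html", ["Docling", "Unstructured", "BSHTMLLoader"]),
  ("htm", ["Docling", "Unstructured", "BSHTMLLoader"]),
  ("md", ["Docling", "Unstructured"]),
  ("txt", ["Docling", "Unstructured"]),
  ("png", ["Docling"]),
  ("jpg", ["Docling"]),
  ("jpeg", ["Docling"]),
  ("tiff", ["Docling"]),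
  ("bmp", ["Docling"]),
  ("csv", ["Unstructured", "CSVLoader"]),
  ("json", ["Unstructured", "JSONLoader"])]

def get_available_parsers_alt (file_extension : String) : List String :=
  if file_extension = "" then pvB_PARSER_NAMES
  else pvB_EXT_TO_PARSERS.getD file_extension []

-- ===== PRECONDITION & SPEC =====
def Spec_get_available_parsers (file_extension : String) (out : List String) : Prop := out = get_available_parsers_alt file_extension
instance (file_extension : String) (out : List String) : Decidable (Spec_get_available_parsers file_extension out) := by unfold Spec_get_available_parsers; infer_instance

-- ===== CLAIM (what is proved, stated in full; the proofs are below) =====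
def Claim_equal_get_available_parsers : Prop := ∀ (file_extension : String), Dom_get_available_parsers file_extension → Spec_get_available_parsers file_extension (get_available_parsers file_extension)

-- ===== LEMMAS AND PROOFS =====

-- every extension any parser supports
def pvAllExts : List String :=
  ["pdf", "docx", "pptx", "xlsx", "html", "htm", "md", "txt", "png", "jpg", "jpeg", "tiff", "bmp", "csv", "json"]

-- PARSER_SUPPORT as a literal dict (ofList with distinct keys)
set_option maxRecDepth 8192 in
theorem pvSupport_eval : pvPARSER_SUPPORT = PySem.Dict.mk [
  ("Docling", ["pdf", "docx", "pptx", "xlsx", "html", "htm", "md", "txt", "png", "jpg", "jpeg", "tiff", "bmp"]),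
  ("Unstructured", ["pdf", "docx", "pptx", "xlsx", "html", "htm", "md", "txt", "csv", "json"]),
  ("PyPDFLoader", ["pdf"]), ("PyMuPDF", ["pdf"]), ("PyMuPDF4LLM", ["pdf"]),
  ("PDFPlumber", ["pdf"]), ("PyPDFium2", ["pdf"]), ("PDFMiner", ["pdf"]),
  ("OpenDataLoader", ["pdf"]), ("PyPDFDirectory", ["pdf"]), ("CSVLoader", ["csv"]),
  ("JSONLoader", ["json"]), ("BSHTMLLoader", ["html", "htm"])] := by decide

set_option maxRecDepth 8192 in
theorem pvBIndex_eval : pvB_EXT_TO_PARSERS = PySem.Dict.mk [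
  ("pdf", pvB_PDF_PARSERS), ("docx", ["Docling", "Unstructured"]), ("pptx", ["Docling", "Unstructured"]),
  ("xlsx", ["Docling", "Unstructured"]), ("html", ["Docling", "Unstructured", "BSHTMLLoader"]),
  ("htm", ["Docling", "Unstructured", "BSHTMLLoader"]), ("md", ["Docling", "Unstructured"]),
  ("txt", ["Docling", "Unstructured"]), ("png", ["Docling"]), ("jpg", ["Docling"]),
  ("jpeg", ["Docling"]), ("tiff", ["Docling"]), ("bmp", ["Docling"]),
  ("csv", ["Unstructured", "CSVLoader"]), ("json", ["Unstructured", "JSONLoader"])] := by decide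

theorem pv_unknown (s : String) (h : s ∉ pvAllExts) (hne : s ≠ "") :
    get_available_parsers s = [] ∧ get_available_parsers_alt s = [] := by
  simp only [pvAllExts, List.mem_cons, List.not_mem_nil, or_false, not_or] at h
  obtain ⟨h1, h2, h3, h4, h5, h6, h7, h8, h9, h10, h11, h12, h13, h14, h15⟩ := h
  constructor
  · simp [get_available_parsers, hne, pvSupport_eval, pvPREFERRED_ORDER, List.filter,
      PySem.Dict.getD, PySem.Dict.get?_mk_cons, PySem.Set.contains,
      h1, h2, h3, h4, h5, h6, h7, h8, h9, h10, h11, h12, h13, h14, h15]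
  · simp [get_available_parsers_alt, hne, pvBIndex_eval, PySem.Dict.getD,
      PySem.Dict.get?_mk_cons, PySem.Dict.get?,
      Ne.symm h1, Ne.symm h2, Ne.symm h3, Ne.symm h4, Ne.symm h5, Ne.symm h6, Ne.symm h7,
      Ne.symm h8, Ne.symm h9, Ne.symm h10, Ne.symm h11, Ne.symm h12, Ne.symm h13, Ne.symm h14, Ne.symm h15]

-- ===== VERDICT (by name: the statement is the Claim_ definition above) =====
theorem get_available_parsers_spec : Claim_equal_get_available_parsers := by
  intro s _
  unfold Spec_get_available_parsers
  by_cases hne : s = ""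
  · subst hne; decide
  · by_cases hm : s ∈ pvAllExts
    · simp only [pvAllExts, List.mem_cons, List.not_mem_nil, or_false] at hm
      rcases hm with h | h | h | h | h | h | h | h | h | h | h | h | h | h | h <;> subst h <;>
        (set_option maxRecDepth 8192 in decide)
    · obtain ⟨hA, hB⟩ := pv_unknown s hm hne
      rw [hA, hB]
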